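-- pv_equiv track=rewrite | github.com/g1tsys/coding | Day 1/558-validate_date.py | get_top_user_num
-- ===== SOURCE A (Python) =====
-- def put_min_value_to_map(date_prefix, date_suffix, date_map):
--     # 如果日期前缀不在date_map中，则将日期前缀和日期后缀添加到date_map中
--     if date_prefix not in date_map:
--         date_map[date_prefix] = date_suffix
--     else:
--         # 如果日期前缀已存在于date_map中，则比较日期后缀的大小，保留较小的日期后缀
--         if int(date_map[date_prefix]) > int(date_suffix):
--             date_map[date_prefix] = date_suffix
--
-- def get_top_user_num(top_dates):
--     top_user = 0
--     date_map = {}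
--
--     # 遍历top_dates列表中的每个日期
--     for top_date in top_dates:
--         date_parts = top_date.split('.')
--         date_prefix = date_parts[0]
--         date_suffix = date_parts[1]
--         put_min_value_to_map(date_prefix, date_suffix, date_map)
--
--     # 再次遍历top_dates列表中的每个日期
--     for date in top_dates:
--         date_parts = date.split('.')
--         date_prefix = date_parts[0]
--         date_suffix = date_parts[1]
--         # 如果日期前缀在date_map中，并且日期后缀与date_map中对应的日期后缀相等，则top_user加1
--         if date_prefix in date_map and date_map[date_prefix] == date_suffix:
--             top_user += 1
--
--     return top_user
-- ===== SOURCE B (Python) =====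
-- def get_top_user_num(top_dates):
--     # One pass groups each prefix's suffixes, then each group is folded to its
--     # kept minimal suffix and counted; the per-group counts are summed.
--     groups = {}
--     for top_date in top_dates:
--         date_parts = top_date.split('.')
--         groups[date_parts[0]] = groups.get(date_parts[0], []) + [date_parts[1]]
--
--     total = 0
--     for suffixes in groups.values():
--         kept = suffixes[0]
--         for s in suffixes[1:]:
--             if int(kept) > int(s):
--                 kept = s
--         total += suffixes.count(kept)
--     return total
-- ===== Notes on version B (the rewrite author's own statement) =====
-- stated objective: alternative
-- what changed: Instead of A's two full passes (building a prefix-to-min-suffix dict via put_min_value_to_map, then rescanning all dates to count matches), B groups the suffixes by prefix in one pass and then, per group, folds to the kept minimal suffix and adds that group's count of it.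
import Mathlib
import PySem

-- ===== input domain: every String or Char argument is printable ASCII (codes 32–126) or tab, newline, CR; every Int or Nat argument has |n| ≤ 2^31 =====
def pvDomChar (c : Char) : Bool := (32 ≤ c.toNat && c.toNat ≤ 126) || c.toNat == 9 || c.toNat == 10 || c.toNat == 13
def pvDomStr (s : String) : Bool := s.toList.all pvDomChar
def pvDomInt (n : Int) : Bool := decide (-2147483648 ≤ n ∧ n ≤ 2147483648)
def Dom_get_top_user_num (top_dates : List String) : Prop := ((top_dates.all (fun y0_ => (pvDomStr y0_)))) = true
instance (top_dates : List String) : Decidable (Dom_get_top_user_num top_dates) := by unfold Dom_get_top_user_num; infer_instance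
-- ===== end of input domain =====

-- B replaces A's two passes over `top_dates` (map-building pass + counting pass) by a
-- grouping pass (prefix → list of its suffixes) followed by a per-group fold and count; same cost.

-- prefix = date_parts[0], suffix = date_parts[1] of top_date.split('.')
-- (the .getD "" default is never reached under Pre_, which requires two parts)
def pvPfx (s : String) : String := (PySem.List.pyGet? ((PySem.Str.split? s ".").getD []) 0).getD ""
def pvSfx (s : String) : String := (PySem.List.pyGet? ((PySem.Str.split? s ".").getD []) 1).getD ""

-- ===== PORT A =====
def put_min_value_to_map (date_prefix date_suffix : String)
    (date_map : PySem.Dict String String) : PySem.Dict String String :=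
  if ¬ date_map.contains date_prefix then
    date_map.insert date_prefix date_suffix
  else
    if (PySem.Int.ofStr? (date_map.getD date_prefix "")).getD 0 >
        (PySem.Int.ofStr? date_suffix).getD 0 then
      date_map.insert date_prefix date_suffix
    else date_map

def get_top_user_num (top_dates : List String) : Int :=
  let date_map := top_dates.foldl
    (fun date_map top_date => put_min_value_to_map (pvPfx top_date) (pvSfx top_date) date_map)
    PySem.Dict.empty
  top_dates.foldl
    (fun top_user date =>
      if date_map.contains (pvPfx date) && (date_map.getD (pvPfx date) "" == pvSfx date) then
        top_user + 1
      else top_user) 0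

-- ===== PORT B =====
-- kept = suffixes[0]; for s in suffixes[1:]: if int(kept) > int(s): kept = s
def pvKept (suffixes : List String) : String :=
  match suffixes with
  | [] => ""   -- unreachable: groups are never empty
  | kept :: rest =>
    rest.foldl
      (fun kept s =>
        if (PySem.Int.ofStr? kept).getD 0 > (PySem.Int.ofStr? s).getD 0 then s else kept)
      kept

def get_top_user_num_alt (top_dates : List String) : Int :=
  let groups := top_dates.foldl
    (fun groups top_date =>
      groups.modify (pvPfx top_date) [] (fun l => l ++ [pvSfx top_date]))
    PySem.Dict.empty
  groups.values.foldl
    (fun total suffixes => total + (suffixes.count (pvKept suffixes) : Int)) 0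

-- ===== PRECONDITION & SPEC =====
-- Exactly the inputs on which A returns: every date splits into at least two parts
-- (else IndexError on date_parts[1]), and every suffix whose prefix occurs more than
-- once is a valid int() literal (else ValueError in put_min_value_to_map).
def Pre_get_top_user_num (top_dates : List String) : Prop :=
  ∀ s ∈ top_dates, 2 ≤ ((PySem.Str.split? s ".").getD []).length ∧
    (1 < (top_dates.map pvPfx).count (pvPfx s) → (PySem.Int.ofStr? (pvSfx s)).isSome = true)
instance (top_dates : List String) : Decidable (Pre_get_top_user_num top_dates) := by
  unfold Pre_get_top_user_num; infer_instance

def pvWitness_get_top_user_num : List String := ["a.1", "a.2", "b.x"]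

def Spec_get_top_user_num (top_dates : List String) (out : Int) : Prop := out = get_top_user_num_alt top_dates
instance (top_dates : List String) (out : Int) : Decidable (Spec_get_top_user_num top_dates out) := by unfold Spec_get_top_user_num; infer_instance

-- ===== CLAIM (what is proved, stated in full; the proofs are below) =====
def Claim_equal_get_top_user_num : Prop := ∀ (top_dates : List String), Dom_get_top_user_num top_dates → Pre_get_top_user_num top_dates → Spec_get_top_user_num top_dates (get_top_user_num top_dates)

-- ===== LEMMAS AND PROOFS =====

-- the ordered list of suffixes of the dates of l whose prefix is p
def pvGroup (l : List String) (p : String) : List String :=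
  (l.filter (fun s => pvPfx s == p)).map pvSfx

-- the first pass of A, resp. of B
def pvPassA (l : List String) : PySem.Dict String String :=
  l.foldl (fun m s => put_min_value_to_map (pvPfx s) (pvSfx s) m) PySem.Dict.empty

def pvPassB (l : List String) : PySem.Dict String (List String) :=
  l.foldl (fun g s => g.modify (pvPfx s) [] (fun t => t ++ [pvSfx s])) PySem.Dict.empty

lemma pvGroup_append (l : List String) (s p : String) :
    pvGroup (l ++ [s]) p = pvGroup l p ++ (if pvPfx s == p then [pvSfx s] else []) := by
  simp only [pvGroup, List.filter_append, List.map_append]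
  by_cases h : pvPfx s == p <;> simp [h]

lemma pvKept_append (k : String) (t : List String) (x : String) :
    pvKept ((k :: t) ++ [x]) =
      (if (PySem.Int.ofStr? (pvKept (k :: t))).getD 0 > (PySem.Int.ofStr? x).getD 0 then x
       else pvKept (k :: t)) := by
  simp [pvKept, List.foldl_append]

lemma pvPassB_eq_pairs (l : List String) :
    pvPassB l = (l.map (fun s => (pvPfx s, pvSfx s))).foldl
      (fun d q => d.modify q.1 [] (fun t => t ++ [q.2])) PySem.Dict.empty := by
  rw [List.foldl_map]; rfl

lemma pvPassB_getD (l : List String) (p : String) :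
    (pvPassB l).getD p [] = pvGroup l p := by
  rw [pvPassB_eq_pairs, PySem.Dict.getD_foldl_modify_append]
  simp [pvGroup, List.filter_map, List.map_map, Function.comp_def]

lemma pvPassB_keys (l : List String) :
    (pvPassB l).keys = PySem.Set.ofList (l.map pvPfx) := by
  have h := PySem.Dict.keys_foldl_modify_key l pvPfx [] (fun _ s t => t ++ [pvSfx s]) PySem.Dict.empty
  rw [PySem.Dict.keys_empty] at h
  exact h

lemma pvPassB_nodup (l : List String) : (pvPassB l).keys.Nodup := by
  rw [pvPassB_keys]; exact PySem.Set.nodup_ofList _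

-- characterisation of A's first pass: each entry is the kept suffix of its group
lemma pvPassA_get? (l : List String) (p : String) :
    (pvPassA l).get? p =
      match pvGroup l p with
      | [] => none
      | sl => some (pvKept sl) := by
  induction l using List.reverseRecOn with
  | nil => simp [pvPassA, pvGroup, PySem.Dict.get?_empty]
  | append_singleton t s ih =>
    have hA : pvPassA (t ++ [s]) = put_min_value_to_map (pvPfx s) (pvSfx s) (pvPassA t) := by
      simp [pvPassA, List.foldl_append]
    rw [hA, pvGroup_append]
    by_cases h : pvPfx s = p
    · subst h
      rw [if_pos (by simp)]
      cases e : pvGroup t (pvPfx s) with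
      | nil =>
        have hc : (pvPassA t).contains (pvPfx s) = false := by
          rw [PySem.Dict.contains_eq_isSome_get?, ih, e]; rfl
        simp [put_min_value_to_map, hc, PySem.Dict.get?_insert_self, pvKept]
      | cons k tt =>
        have hg : (pvPassA t).get? (pvPfx s) = some (pvKept (k :: tt)) := by rw [ih, e]
        have hc : (pvPassA t).contains (pvPfx s) = true := by
          rw [PySem.Dict.contains_eq_isSome_get?, hg]; rfl
        have hd : (pvPassA t).getD (pvPfx s) "" = pvKept (k :: tt) := by
          rw [PySem.Dict.getD_eq_get?_getD, hg]; rfl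
        have hk : pvKept (k :: (tt ++ [pvSfx s]))
            = (if (PySem.Int.ofStr? (pvKept (k :: tt))).getD 0 > (PySem.Int.ofStr? (pvSfx s)).getD 0
               then pvSfx s else pvKept (k :: tt)) := by
          rw [← List.cons_append, pvKept_append]
        unfold put_min_value_to_map
        rw [if_neg (by simp [hc]), hd]
        by_cases hcmp : (PySem.Int.ofStr? (pvKept (k :: tt))).getD 0 > (PySem.Int.ofStr? (pvSfx s)).getD 0
        · rw [if_pos hcmp, PySem.Dict.get?_insert_self]
          show some (pvSfx s) = some (pvKept (k :: (tt ++ [pvSfx s])))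
          rw [hk, if_pos hcmp]
        · rw [if_neg hcmp, hg]
          show some (pvKept (k :: tt)) = some (pvKept (k :: (tt ++ [pvSfx s])))
          rw [hk, if_neg hcmp]
    · rw [if_neg (by simp [h]), List.append_nil]
      rw [← ih]
      have hne : p ≠ pvPfx s := fun he => h he.symm
      unfold put_min_value_to_map
      split_ifs <;> simp [PySem.Dict.get?_insert, hne]

lemma pvSum_single {κ : Type} [DecidableEq κ] (ks : List κ) (f : κ → Nat) (a : κ)
    (hnd : ks.Nodup) (ha : a ∈ ks) :
    (ks.map (fun p => if p = a then f p else 0)).sum = f a := by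
  induction ks with
  | nil => cases ha
  | cons b t ih =>
    rcases List.nodup_cons.mp hnd with ⟨hb, ht⟩
    rcases List.mem_cons.mp ha with rfl | hmem
    · have hz : (t.map (fun p => if p = a then f p else 0)).sum = 0 := by
        apply List.sum_eq_zero
        intro x hx
        rcases List.mem_map.mp hx with ⟨q, hq, rfl⟩
        have : q ≠ a := fun he => hb (he ▸ hq)
        simp [this]
      simp [hz]
    · have hba : b ≠ a := fun he => hb (he ▸ hmem)
      simp [hba, ih ht hmem]

lemma pvCountP_partition {α κ : Type} [DecidableEq κ] (K : α → κ) (Q : κ → α → Bool)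
    (l : List α) (ks : List κ) (hnd : ks.Nodup) (hmem : ∀ s ∈ l, K s ∈ ks) :
    (ks.map (fun p => l.countP (fun s => decide (K s = p) && Q p s))).sum =
      l.countP (fun s => Q (K s) s) := by
  induction l with
  | nil => simp
  | cons s t ih =>
    have hmem' : ∀ x ∈ t, K x ∈ ks := fun x hx => hmem x (List.mem_cons_of_mem _ hx)
    have hsplit : (ks.map (fun p => List.countP (fun x => decide (K x = p) && Q p x) (s :: t))).sum
        = (ks.map (fun p => List.countP (fun x => decide (K x = p) && Q p x) t)).sum
          + (ks.map (fun p => if p = K s then (if Q p s then 1 else 0) else 0)).sum := by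
      rw [← List.sum_map_add]
      apply congrArg List.sum
      apply List.map_congr_left
      intro p _
      rw [List.countP_cons]
      by_cases hp : p = K s
      · subst hp; simp
      · have : ¬ (K s = p) := fun he => hp he.symm
        simp [hp, this]
    rw [hsplit, ih hmem', pvSum_single ks _ (K s) hnd (hmem s List.mem_cons_self),
      List.countP_cons]

lemma pvGroup_count (l : List String) (p v : String) :
    (pvGroup l p).count v
      = l.countP (fun s => decide (pvPfx s = p) && decide (pvSfx s = v)) := by
  rw [List.count_eq_countP, pvGroup, List.countP_map, List.countP_filter]
  apply List.countP_congr
  intro s _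
  simp [Function.comp, beq_iff_eq, and_comm]

lemma pvGroup_ne_nil (l : List String) (s : String) (hs : s ∈ l) :
    pvGroup l (pvPfx s) ≠ [] := by
  have : pvSfx s ∈ pvGroup l (pvPfx s) := by
    apply List.mem_map_of_mem
    exact List.mem_filter.mpr ⟨hs, by simp⟩
  intro he
  rw [he] at this
  cases this

-- ===== VERDICT (by name: the statement is the Claim_ definition above) =====
theorem get_top_user_num_spec : Claim_equal_get_top_user_num := by
  unfold Claim_equal_get_top_user_num
  intro l _ _
  unfold Spec_get_top_user_num
  change (l.foldl (fun acc s =>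
      if (pvPassA l).contains (pvPfx s) && ((pvPassA l).getD (pvPfx s) "" == pvSfx s) then acc + 1
      else acc) 0)
    = (pvPassB l).values.foldl (fun tot sl => tot + (sl.count (pvKept sl) : Int)) 0
  rw [PySem.List.foldl_if_add_one
      (fun s => (pvPassA l).contains (pvPfx s) && ((pvPassA l).getD (pvPfx s) "" == pvSfx s)),
    PySem.List.foldl_add (pvPassB l).values (fun sl => ((List.count (pvKept sl) sl : Nat) : Int)) 0,
    PySem.Dict.values_eq_map_keys _ (pvPassB_nodup l) [], List.map_map]
  have hmap : ((pvPassB l).keys.map ((fun sl => (sl.count (pvKept sl) : Int)) ∘ fun k => (pvPassB l).getD k []))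
      = (pvPassB l).keys.map (fun p => ((pvGroup l p).count (pvKept (pvGroup l p)) : Int)) := by
    apply List.map_congr_left
    intro p _
    simp [Function.comp, pvPassB_getD]
  rw [hmap, pvPassB_keys]
  have hcast : ((PySem.Set.ofList (l.map pvPfx)).map
        (fun p => ((pvGroup l p).count (pvKept (pvGroup l p)) : Int))).sum
      = (((PySem.Set.ofList (l.map pvPfx)).map
        (fun p => (pvGroup l p).count (pvKept (pvGroup l p)))).sum : Int) := by
    rw [Nat.cast_list_sum, List.map_map]
    rfl
  rw [hcast, zero_add, zero_add]
  have hA : l.countP (fun s => (pvPassA l).contains (pvPfx s) && ((pvPassA l).getD (pvPfx s) "" == pvSfx s))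
      = l.countP (fun s => decide (pvSfx s = pvKept (pvGroup l (pvPfx s)))) := by
    apply List.countP_congr
    intro s hs
    cases e : pvGroup l (pvPfx s) with
    | nil => exact absurd e (pvGroup_ne_nil l s hs)
    | cons k tt =>
      have hg : (pvPassA l).get? (pvPfx s) = some (pvKept (pvGroup l (pvPfx s))) := by
        rw [pvPassA_get?, e]
      have hc : (pvPassA l).contains (pvPfx s) = true := by
        rw [PySem.Dict.contains_eq_isSome_get?, hg]; rfl
      have hd : (pvPassA l).getD (pvPfx s) "" = pvKept (pvGroup l (pvPfx s)) := by
        rw [PySem.Dict.getD_eq_get?_getD, hg]; rfl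
      simp only [hc, hd, Bool.true_and, beq_iff_eq, e, decide_eq_true_iff]
      exact eq_comm
  rw [hA]
  rw [← pvCountP_partition pvPfx (fun p s => decide (pvSfx s = pvKept (pvGroup l p))) l
      (PySem.Set.ofList (l.map pvPfx)) (PySem.Set.nodup_ofList _)
      (fun s hs => (PySem.Set.mem_ofList _ _).mpr (List.mem_map_of_mem hs))]
  apply congrArg
  apply congrArg List.sum
  apply List.map_congr_left
  intro p _
  exact (pvGroup_count l p _).symm
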